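-- pv_equiv track=rewrite | github.com/KotisKotlyandii/lessons1 | ege22/126.py | f
-- ===== SOURCE A (Python) =====
-- def f(x):
--     a,b = 0,1
--     while x > 0:
--         if x % 2 == 0:
--             a += x % 11
--         else:
--             b *= x % 11
--         x //= 11
--     return a,b
-- ===== SOURCE B (Python) =====
-- def f(x):
--     # Extract the base-11 digits (low to high), never looking at the
--     # parity of the remaining value.
--     digits = []
--     while x > 0:
--         digits.append(x % 11)
--         x //= 11
--     # Since 11 is odd, the remaining value at each step is congruent mod 2
--     # to the sum of its remaining digits.  Scan the digit list back-to-front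
--     # maintaining that suffix-sum parity.
--     a, b, p = 0, 1, 0
--     for d in reversed(digits):
--         p = (p + d) % 2
--         if p == 0:
--             a += d
--         else:
--             b *= d
--     return a, b
-- ===== Notes on version B (the rewrite author's own statement) =====
-- stated objective: alternative
-- what changed: B never inspects the parity of the remaining value: it extracts the plain base-eleven digit list, then scans it back-to-front maintaining a suffix-sum parity accumulator, which is correct because the base is odd so the remaining value has the same parity as the sum of its remaining digits.
import Mathlib
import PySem

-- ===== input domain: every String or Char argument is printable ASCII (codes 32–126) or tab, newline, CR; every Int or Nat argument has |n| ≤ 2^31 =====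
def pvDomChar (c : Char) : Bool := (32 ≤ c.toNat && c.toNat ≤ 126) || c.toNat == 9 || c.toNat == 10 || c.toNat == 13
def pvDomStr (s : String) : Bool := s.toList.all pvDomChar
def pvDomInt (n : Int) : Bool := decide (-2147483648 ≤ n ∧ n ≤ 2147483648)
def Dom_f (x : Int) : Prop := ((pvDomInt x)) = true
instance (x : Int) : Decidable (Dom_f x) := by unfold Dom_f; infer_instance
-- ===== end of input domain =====

-- B never inspects the remaining value's parity: it extracts the base-11 digit list,
-- then scans it back-to-front with a suffix-sum parity accumulator (the base is odd, so the
-- remaining value is of the same parity as the sum of its remaining digits).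

-- ===== PORT A =====
-- A's while-loop with interleaved accumulators a (sum) and b (product).
def fGo (x a b : Int) : Int × Int :=
  if _h : x > 0 then
    if PySem.Int.mod x 2 == 0 then
      fGo (PySem.Int.floordiv x 11) (a + PySem.Int.mod x 11) b
    else
      fGo (PySem.Int.floordiv x 11) a (b * PySem.Int.mod x 11)
  else (a, b)
termination_by x.toNat
decreasing_by
  all_goals
    simp [PySem.Int.floordiv, Int.fdiv_eq_ediv]
    omega

def f (x : Int) : Int × Int := fGo x 0 1

-- ===== PORT B =====
-- the plain base-11 digit list, low to high
def fDigitsB (x : Int) : List Int :=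
  if _h : x > 0 then
    PySem.Int.mod x 11 :: fDigitsB (PySem.Int.floordiv x 11)
  else []
termination_by x.toNat
decreasing_by
  simp [PySem.Int.floordiv, Int.fdiv_eq_ediv]
  omega

-- one step of B's reversed scan: state (a, b, suffix parity)
def fStepB (st : Int × Int × Int) (d : Int) : Int × Int × Int :=
  let p := PySem.Int.mod (st.2.2 + d) 2
  if p == 0 then (st.1 + d, st.2.1, p) else (st.1, st.2.1 * d, p)

def f_alt (x : Int) : Int × Int :=
  let st := (fDigitsB x).reverse.foldl fStepB (0, 1, 0)
  (st.1, st.2.1)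

-- ===== PRECONDITION & SPEC =====
def Spec_f (x : Int) (out : Int × Int) : Prop := out = f_alt x
instance (x : Int) (out : Int × Int) : Decidable (Spec_f x out) := by unfold Spec_f; infer_instance

-- ===== CLAIM (what is proved, stated in full; the proofs are below) =====
def Claim_equal_f : Prop := ∀ (x : Int), Dom_f x → Spec_f x (f x)

-- ===== LEMMAS AND PROOFS =====

-- structural recursion computing A's pair (proof helper)
def fRec (x : Int) : Int × Int :=
  if _h : x > 0 then
    let r := fRec (PySem.Int.floordiv x 11)
    if PySem.Int.mod x 2 == 0 then (r.1 + PySem.Int.mod x 11, r.2)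
    else (r.1, r.2 * PySem.Int.mod x 11)
  else (0, 1)
termination_by x.toNat
decreasing_by
  simp [PySem.Int.floordiv, Int.fdiv_eq_ediv]
  omega

theorem fGo_eq (x a b : Int) : fGo x a b = (a + (fRec x).1, b * (fRec x).2) := by
  fun_induction fGo x a b with
  | case1 x a b hx hpar ih =>
    rw [ih]
    conv_rhs => rw [fRec.eq_def]
    simp only [hx, dite_true, hpar, if_true]
    exact Prod.ext (by ring) (by ring)
  | case2 x a b hx hpar ih =>
    rw [ih]
    conv_rhs => rw [fRec.eq_def]
    simp only [hx, dite_true, hpar, Bool.false_eq_true, if_false]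
    exact Prod.ext (by ring) (by ring)
  | case3 x a b hx =>
    rw [fRec.eq_def]
    simp [hx]

theorem foldB_eq (x : Int) (hx : 0 ≤ x) :
    (fDigitsB x).reverse.foldl fStepB (0, 1, 0) =
      ((fRec x).1, (fRec x).2, PySem.Int.mod x 2) := by
  fun_induction fDigitsB x with
  | case1 x hx' ih =>
    have hx'' : (0 : Int) ≤ PySem.Int.floordiv x 11 := by
      simp only [PySem.Int.floordiv, Int.fdiv_eq_ediv]
      omega
    rw [List.reverse_cons, List.foldl_append, ih hx'']
    have hrec : fRec x =
        (if PySem.Int.mod x 2 == 0 then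
            ((fRec (PySem.Int.floordiv x 11)).1 + PySem.Int.mod x 11,
              (fRec (PySem.Int.floordiv x 11)).2)
          else
            ((fRec (PySem.Int.floordiv x 11)).1,
              (fRec (PySem.Int.floordiv x 11)).2 * PySem.Int.mod x 11)) := by
      rw [fRec.eq_def]
      simp [hx']
    rw [hrec]
    generalize fRec (PySem.Int.floordiv x 11) = r
    simp only [List.foldl_cons, List.foldl_nil, fStepB]
    have hfd : PySem.Int.floordiv x 11 = x / 11 :=
      PySem.Int.floordiv_eq_ediv_of_pos (by omega)
    have hm11 : PySem.Int.mod x 11 = x % 11 :=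
      PySem.Int.mod_eq_emod_of_pos (by omega)
    have hm2 : ∀ y : Int, PySem.Int.mod y 2 = y % 2 := fun y =>
      PySem.Int.mod_eq_emod_of_pos (by omega)
    rw [hfd, hm11, hm2, hm2, hm2]
    have hp : (x / 11 % 2 + x % 11) % 2 = x % 2 := by omega
    rw [hp]
    by_cases h0 : x % 2 = 0
    · simp [h0]
    · have h0' : ¬ ((x % 2 : Int) == 0) = true := by simpa using h0
      simp only [h0', Bool.false_eq_true, if_false]
  | case2 x hx' =>
    rw [fRec.eq_def]
    have hx0 : x = 0 := by omega
    subst hx0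
    simp [PySem.Int.mod]

-- ===== VERDICT (by name: the statement is the Claim_ definition above) =====
theorem f_spec : Claim_equal_f := by
  intro x _
  unfold Spec_f f f_alt
  rw [fGo_eq]
  by_cases hx : 0 ≤ x
  · rw [foldB_eq x hx]
    simp
  · rw [fDigitsB.eq_def, fRec.eq_def]
    simp only [show ¬ x > 0 by omega, dite_false]
    simp
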